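-- pv_equiv track=rewrite | github.com/mi-qing00/ai-code-review-agent | app/github/client.py | _preprocess_diff
-- ===== SOURCE A (Python) =====
-- def _preprocess_diff(diff_text: str) -> str:
--     """
--     Preprocess diff to remove binary files and clean up.
--
--     Args:
--         diff_text: Raw diff text
--
--     Returns:
--         Preprocessed diff text
--     """
--     lines = diff_text.split("\n")
--     processed_lines = []
--     skip_file = False
--
--     for line in lines:
--         # Skip binary files
--         if "Binary files differ" in line or "GIT binary patch" in line:
--             skip_file = True
--             continue
--
--         # Reset skip flag when we hit a new file header
--         if line.startswith("diff --git"):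
--             skip_file = False
--
--         if not skip_file:
--             processed_lines.append(line)
--
--     return "\n".join(processed_lines)
-- ===== SOURCE B (Python) =====
-- def _split_sections(lines):
--     sections = []
--     cur = []
--     for line in lines:
--         if line.startswith("diff --git"):
--             sections.append(cur)
--             cur = [line]
--         else:
--             cur.append(line)
--     sections.append(cur)
--     return sections
--
--
-- def _keep(section):
--     out = []
--     for line in section:
--         if "Binary files differ" in line or "GIT binary patch" in line:
--             break
--         out.append(line)
--     return out
--
--
-- def _preprocess_diff(diff_text: str) -> str:
--     kept = []
--     for sec in _split_sections(diff_text.split("\n")):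
--         kept.extend(_keep(sec))
--     return "\n".join(kept)
-- ===== Notes on version B (the rewrite author's own statement) =====
-- stated objective: alternative
-- what changed: Replaces A's single pass carrying a skip_file flag across lines by a two-phase decomposition: partition the lines into per-file-header sections, then truncate each section at its first binary-marker line and concatenate.
import Mathlib
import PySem

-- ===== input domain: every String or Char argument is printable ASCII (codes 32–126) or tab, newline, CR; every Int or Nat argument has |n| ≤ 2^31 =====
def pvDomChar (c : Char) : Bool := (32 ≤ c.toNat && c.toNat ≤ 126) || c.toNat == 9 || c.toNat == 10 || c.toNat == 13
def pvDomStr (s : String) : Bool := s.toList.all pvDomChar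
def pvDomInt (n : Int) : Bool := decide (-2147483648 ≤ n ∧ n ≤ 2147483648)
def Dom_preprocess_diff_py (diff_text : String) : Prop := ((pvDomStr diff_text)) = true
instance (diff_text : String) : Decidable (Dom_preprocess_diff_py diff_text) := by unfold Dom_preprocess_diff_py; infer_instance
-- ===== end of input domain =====

-- B replaces A's single pass with a stateful skip flag by a two-phase decomposition:
-- partition the lines into 'diff --git' sections, then truncate each section at its
-- first binary marker; same return value, objective: alternative decomposition.

-- ===== PORT A =====
-- "Binary files differ" in line or "GIT binary patch" in line
def pvMarker (line : String) : Bool :=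
  PySem.Str.isIn "Binary files differ" line || PySem.Str.isIn "GIT binary patch" line

-- A's for-loop: accumulator processed_lines and the skip_file flag
def pvLoopA : List String → List String → Bool → List String
  | [], acc, _ => acc
  | l :: ls, acc, skip =>
    if pvMarker l then pvLoopA ls acc true
    else
      let skip' := if PySem.Str.startswith l "diff --git" then false else skip
      if !skip' then pvLoopA ls (acc ++ [l]) skip'
      else pvLoopA ls acc skip'

-- s.split("\n"): split? is some because the separator is nonempty; .getD [] discharges the option
def preprocess_diff_py (diff_text : String) : String :=
  PySem.Str.join "\n" (pvLoopA ((PySem.Str.split? diff_text "\n").getD []) [] false)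

-- ===== PORT B =====
-- Source B _split_sections: new section at each 'diff --git' line, cur is the open section
def pvSplitSections : List String → List String → List (List String)
  | [], cur => [cur]
  | l :: ls, cur =>
    if PySem.Str.startswith l "diff --git" then cur :: pvSplitSections ls [l]
    else pvSplitSections ls (cur ++ [l])

-- Source B _keep: lines of a section before its first binary marker
def pvKeep : List String → List String
  | [] => []
  | l :: ls => if pvMarker l then [] else l :: pvKeep ls

def preprocess_diff_py_alt (diff_text : String) : String :=
  PySem.Str.join "\n"
    (((pvSplitSections ((PySem.Str.split? diff_text "\n").getD []) []).map pvKeep).flatten)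

-- ===== PRECONDITION & SPEC =====
def Spec_preprocess_diff_py (diff_text : String) (out : String) : Prop := out = preprocess_diff_py_alt diff_text
instance (diff_text : String) (out : String) : Decidable (Spec_preprocess_diff_py diff_text out) := by unfold Spec_preprocess_diff_py; infer_instance

-- ===== CLAIM (what is proved, stated in full; the proofs are below) =====
def Claim_equal_preprocess_diff_py : Prop := ∀ (diff_text : String), Dom_preprocess_diff_py diff_text → Spec_preprocess_diff_py diff_text (preprocess_diff_py diff_text)

-- ===== LEMMAS AND PROOFS =====

-- accumulator-free version of A's loop
def pvProcA : List String → Bool → List String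
  | [], _ => []
  | l :: ls, skip =>
    if pvMarker l then pvProcA ls true
    else if PySem.Str.startswith l "diff --git" then l :: pvProcA ls false
    else if skip then pvProcA ls skip
    else l :: pvProcA ls skip

theorem pvLoopA_eq_acc (ls : List String) : ∀ (acc : List String) (skip : Bool),
    pvLoopA ls acc skip = acc ++ pvProcA ls skip := by
  induction ls with
  | nil => intro acc skip; simp [pvLoopA, pvProcA]
  | cons l ls ih =>
    intro acc skip
    simp only [pvLoopA, pvProcA]
    by_cases hm : pvMarker l = true
    · rw [if_pos hm, if_pos hm, ih]
    · rw [if_neg hm, if_neg hm]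
      by_cases hs : PySem.Str.startswith l "diff --git" = true
      · simp only [hs, if_true, Bool.not_false, ih]; simp
      · simp only [hs, Bool.if_false_left]
        cases skip <;> simp [ih]

theorem pvKeep_of_no_marker (xs : List String) (h : xs.any pvMarker = false) :
    pvKeep xs = xs := by
  induction xs with
  | nil => rfl
  | cons x xs ih =>
    simp only [List.any_cons, Bool.or_eq_false_iff] at h
    simp [pvKeep, h.1, ih h.2]

theorem pvKeep_append (xs ys : List String) :
    pvKeep (xs ++ ys) = if xs.any pvMarker then pvKeep xs else xs ++ pvKeep ys := by
  induction xs with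
  | nil => simp
  | cons x xs ih =>
    by_cases hx : pvMarker x = true
    · simp [pvKeep, hx]
    · rw [Bool.not_eq_true] at hx
      simp only [List.cons_append, pvKeep, hx, Bool.false_eq_true, if_false,
        List.any_cons, Bool.false_or, ih]
      split_ifs <;> rfl

theorem pvSections_keep (ls : List String) : ∀ (cur : List String),
    ((pvSplitSections ls cur).map pvKeep).flatten
      = pvKeep cur ++ pvProcA ls (cur.any pvMarker) := by
  induction ls with
  | nil => intro cur; simp [pvSplitSections, pvProcA]
  | cons l ls ih =>
    intro cur
    simp only [pvSplitSections, pvProcA]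
    by_cases hs : PySem.Str.startswith l "diff --git" = true
    · rw [if_pos hs, if_pos hs]
      by_cases hm : pvMarker l = true
      · rw [if_pos hm]
        simp [ih, pvKeep, hm]
      · rw [if_neg hm]
        simp [ih, pvKeep, hm]
    · rw [if_neg hs, if_neg hs, ih, pvKeep_append]
      by_cases hc : cur.any pvMarker = true
      · simp only [hc, if_true, List.any_append, Bool.true_or]
        split_ifs <;> rfl
      · rw [Bool.not_eq_true] at hc
        simp only [hc, Bool.false_eq_true, if_false, List.any_append,
          Bool.false_or, List.any_cons, List.any_nil, Bool.or_false,
          pvKeep_of_no_marker cur hc]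
        by_cases hm : pvMarker l = true
        · simp [hm, pvKeep]
        · rw [Bool.not_eq_true] at hm
          simp [hm, pvKeep]

-- ===== VERDICT (by name: the statement is the Claim_ definition above) =====
theorem preprocess_diff_py_spec : Claim_equal_preprocess_diff_py := by
  intro diff_text _
  unfold Spec_preprocess_diff_py preprocess_diff_py preprocess_diff_py_alt
  rw [pvLoopA_eq_acc, pvSections_keep]
  simp [pvKeep]
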